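-- pv_equiv track=rewrite | github.com/ash0x0/interviews | hackernoon/tower.breakers.1.py | makePlayerMove
-- ===== SOURCE A (Python) =====
-- def makePlayerMove(player_num, towers):
--     solution_found = False
--     for i in range(len(towers)):
--         for j in range(towers[i], 1, -1):
--             if towers[i] % j == 0:
--                 towers[i] = int(towers[i] / j)
--                 solution_found = True
--                 break
--         if solution_found:
--             return None
--     if not solution_found:
--         if player_num == 1:
--             return 2
--         else:
--             return 1
-- ===== SOURCE B (Python) =====
-- def makePlayerMove(player_num, towers):
--     # Count-based: aggregate the whole list first (no short-circuit scan, no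
--     # nested divisor loop), then mutate separately if a breakable tower exists.
--     breakable = sum(t > 1 for t in towers)
--     if breakable == 0:
--         return 2 if player_num == 1 else 1
--     towers[[t > 1 for t in towers].index(True)] = 1
--     return None
-- ===== Notes on version B (the rewrite author's own statement) =====
-- stated objective: alternative
-- what changed: Replaced A's nested loops (flag + inner divisor countdown with early return) by a full-list aggregation: count the towers greater than 1, decide the winner from the count, and perform the mutation in a separate index-of-True pass.
import Mathlib
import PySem

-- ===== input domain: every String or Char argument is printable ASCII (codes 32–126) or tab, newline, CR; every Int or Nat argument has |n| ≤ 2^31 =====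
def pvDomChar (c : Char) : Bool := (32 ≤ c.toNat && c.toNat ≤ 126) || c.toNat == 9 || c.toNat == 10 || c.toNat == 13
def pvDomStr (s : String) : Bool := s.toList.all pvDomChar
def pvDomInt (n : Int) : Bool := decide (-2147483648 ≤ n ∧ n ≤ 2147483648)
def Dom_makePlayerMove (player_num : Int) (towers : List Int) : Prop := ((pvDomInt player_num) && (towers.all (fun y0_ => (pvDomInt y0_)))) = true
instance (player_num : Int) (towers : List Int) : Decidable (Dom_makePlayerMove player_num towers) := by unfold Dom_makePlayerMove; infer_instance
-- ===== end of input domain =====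

-- B replaces A's nested loop (inner divisor countdown, flag, early return) by a
-- count aggregation over the whole list plus a separate mutation pass; objective: alternative.
-- Both Pythons mutate `towers` identically (first tower > 1 becomes 1); the theorem is about the return value.


-- ===== PORT A =====
-- inner loop 'for j in range(towers[i], 1, -1): if towers[i] % j == 0: … break':
-- j counts down lazily from t, stopping above 1, exactly like Python's range iterator;
-- returns the new tower value int(towers[i]/j) on break (int(t/j) = truncdiv, exact
-- here since |t| ≤ 2^31 < 2^53).
def pvInnerA (t j : Int) : Option Int :=
  if h : 1 < j then
    if PySem.Int.mod t j = 0 then some (PySem.Int.truncdiv t j)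
    else pvInnerA t (j - 1)
  else none
termination_by (j - 1).toNat
decreasing_by omega

-- outer loop over the towers; 'solution_found' + break + early 'return None'
def pvLoopA (player_num : Int) : List Int → Option Int
  | [] => if player_num = 1 then some 2 else some 1
  | t :: rest =>
      if (pvInnerA t t).isSome then none
      else pvLoopA player_num rest

def makePlayerMove (player_num : Int) (towers : List Int) : Option Int :=
  pvLoopA player_num towers

-- ===== PORT B =====
-- Source B: breakable = sum(t > 1 for t in towers); winner from the count, mutation separate
-- (the in-place assignment via index-of-True does not affect the return value).
def makePlayerMove_alt (player_num : Int) (towers : List Int) : Option Int :=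
  let breakable : Nat := towers.countP (fun t => decide (1 < t))
  if breakable = 0 then (if player_num = 1 then some 2 else some 1)
  else none

-- ===== PRECONDITION & SPEC =====
def Spec_makePlayerMove (player_num : Int) (towers : List Int) (out : Option Int) : Prop := out = makePlayerMove_alt player_num towers
instance (player_num : Int) (towers : List Int) (out : Option Int) : Decidable (Spec_makePlayerMove player_num towers out) := by unfold Spec_makePlayerMove; infer_instance

-- ===== CLAIM (what is proved, stated in full; the proofs are below) =====
def Claim_equal_makePlayerMove : Prop := ∀ (player_num : Int) (towers : List Int), Dom_makePlayerMove player_num towers → Spec_makePlayerMove player_num towers (makePlayerMove player_num towers)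

-- ===== LEMMAS AND PROOFS =====

-- A's inner countdown finds a divisor iff the tower exceeds 1 (then j = t on the
-- first iteration and t % t = 0).
theorem pvInnerA_isSome (t : Int) :
    (pvInnerA t t).isSome = decide (1 < t) := by
  unfold pvInnerA
  by_cases h : 1 < t
  · simp [h, PySem.Int.mod_eq_zero_iff_dvd]
  · simp [h]

theorem pvLoopA_eq_alt (player_num : Int) (towers : List Int) :
    pvLoopA player_num towers = makePlayerMove_alt player_num towers := by
  induction towers with
  | nil => simp [pvLoopA, makePlayerMove_alt]
  | cons t rest ih =>
    simp only [pvLoopA, pvInnerA_isSome]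
    by_cases h : 1 < t
    · simp [h, makePlayerMove_alt, List.countP_cons]
    · simpa [h, makePlayerMove_alt, List.countP_cons] using ih

-- ===== VERDICT (by name: the statement is the Claim_ definition above) =====
theorem makePlayerMove_spec : Claim_equal_makePlayerMove := by
  intro p towers _
  unfold Spec_makePlayerMove makePlayerMove
  exact pvLoopA_eq_alt p towers
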